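-- pv_equiv track=rewrite | github.com/carnival77/Algorithm_Practice | Codility/Lesson14.BinarySearchAlgorithm/exercise.py | boards
-- ===== SOURCE A (Python) =====
-- def boards(A, k):
--     n = len(A)
--     beg = 1
--     end = n
--     result = -1
--     while beg <= end:
--         mid = (beg + end) // 2
--         if check(A, mid) <= k:
--             result = mid
--             end = mid - 1
--         else:
--             beg = mid + 1
--     return result
--
-- def check(A, k):
--     n = len(A)
--     boards = 0
--     last = -1
--     for i in range(n):
--         if A[i] == 1 and last < i:
--             boards += 1
--             last = i + k - 1  # 현재 구멍 i를 덮는 판자 범위의 끝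
--     return boards
-- ===== SOURCE B (Python) =====
-- def boards(A, k):
--     ones = [i for i, a in enumerate(A) if a == 1]
--     n = len(A)
--     for L in range(1, n + 1):
--         if _count(ones, L) <= k:
--             return L
--     return -1
--
-- def _count(ones, L):
--     # boards of length L needed to cover all positions in the sorted list `ones`
--     cnt = 0
--     i = 0
--     m = len(ones)
--     while i < m:
--         cnt += 1
--         end = ones[i] + L
--         i += 1
--         while i < m and ones[i] < end:
--             i += 1
--     return cnt
-- ===== Notes on version B (the rewrite author's own statement) =====
-- stated objective: faster
-- what changed: Replaces the binary search over the answer by a linear threshold scan, and replaces the per-length greedy index scan of the whole array by a one-time extraction of the positions of 1s followed by a block-skipping count over that position list, so each feasibility check walks only the 1-positions instead of the whole array.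
import Mathlib
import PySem

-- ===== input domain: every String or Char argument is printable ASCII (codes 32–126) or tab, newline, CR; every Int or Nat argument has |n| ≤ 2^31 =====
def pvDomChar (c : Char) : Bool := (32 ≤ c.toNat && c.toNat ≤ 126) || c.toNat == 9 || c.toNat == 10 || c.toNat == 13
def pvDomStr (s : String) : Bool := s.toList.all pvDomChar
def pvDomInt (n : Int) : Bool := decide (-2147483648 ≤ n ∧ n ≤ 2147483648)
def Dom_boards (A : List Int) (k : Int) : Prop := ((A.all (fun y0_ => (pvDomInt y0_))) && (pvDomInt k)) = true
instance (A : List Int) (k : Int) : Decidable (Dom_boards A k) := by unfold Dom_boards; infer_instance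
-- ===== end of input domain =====

-- B replaces A's binary search over the answer by a linear threshold scan, and the
-- per-length whole-array greedy by a one-time extraction of the 1-positions followed
-- by a block-skipping count over that position list (alternative decomposition).

-- ===== PORT A =====
-- helper `check(A, k)` of A: greedy count of boards of length k needed
def checkA (A : List Int) (k : Int) : Int :=
  ((PySem.List.pyRange 0 (A.length : Int) 1).foldl
    (fun (s : Int × Int) (i : Int) =>
      if PySem.List.pyGetD A i 0 = 1 ∧ s.2 < i then (s.1 + 1, i + k - 1) else s)
    (0, -1)).1

-- the while-loop of A (binary search state: beg, end, result)
def boardsLoop (A : List Int) (k beg end_ result : Int) : Int :=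
  if h : beg ≤ end_ then
    let mid := PySem.Int.floordiv (beg + end_) 2
    if checkA A mid ≤ k then boardsLoop A k beg (mid - 1) mid
    else boardsLoop A k (mid + 1) end_ result
  else result
termination_by (end_ + 1 - beg).toNat
decreasing_by
  all_goals
    have hb := PySem.Int.floordiv_two_mid_bounds h
    omega

def boards (A : List Int) (k : Int) : Int :=
  boardsLoop A k 1 (A.length : Int) (-1)

-- ===== PORT B =====
-- `ones = [i for i, a in enumerate(A) if a == 1]`
def onesOf (A : List Int) : List Int :=
  ((PySem.List.enumerate A 0).filter (fun p => decide (p.2 = 1))).map (fun p => p.1)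

-- `_count(ones, L)`: consume the first position, skip all positions its board covers,
-- recurse.  (The Python while-loop consumes ones[i] then skips the covered tail; for
-- the L ≥ 1 this is called with, that is exactly this cons + dropWhile recursion.)
def countCover (L : Int) : List Int → Int
  | [] => 0
  | p :: ps => 1 + countCover L (ps.dropWhile (fun q => decide (q < p + L)))
termination_by xs => xs.length
decreasing_by
  have := List.length_dropWhile_le (fun q => decide (q < p + L)) ps
  simp; omega

-- the for-loop of B: first L in 1..n with _count(ones, L) <= k, else -1
def scanB (n : Int) (ones : List Int) (k L : Int) : Int :=
  if h : L ≤ n then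
    if countCover L ones ≤ k then L else scanB n ones k (L + 1)
  else -1
termination_by (n + 1 - L).toNat
decreasing_by omega

def boards_alt (A : List Int) (k : Int) : Int :=
  scanB (A.length : Int) (onesOf A) k 1

-- ===== PRECONDITION & SPEC =====
def Spec_boards (A : List Int) (k : Int) (out : Int) : Prop := out = boards_alt A k
instance (A : List Int) (k : Int) (out : Int) : Decidable (Spec_boards A k out) := by unfold Spec_boards; infer_instance

-- ===== CLAIM (what is proved, stated in full; the proofs are below) =====
def Claim_equal_boards : Prop := ∀ (A : List Int) (k : Int), Dom_boards A k → Spec_boards A k (boards A k)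

-- ===== LEMMAS AND PROOFS =====

-- core of A's greedy counter: scan the remaining list with absolute index i
def go (L : Int) : List Int → Int → Int × Int → Int × Int
  | [], _, s => s
  | a :: xs, i, s => go L xs (i + 1) (if a = 1 ∧ s.2 < i then (s.1 + 1, i + L - 1) else s)

lemma go_eq_foldA (A : List Int) (k : Int) :
    ∀ (ys : List Int) (j : Nat), A.drop j = ys → ∀ (s : Int × Int),
    (PySem.List.pyRange (j : Int) (A.length : Int) 1).foldl
      (fun (s : Int × Int) (i : Int) =>
        if PySem.List.pyGetD A i 0 = 1 ∧ s.2 < i then (s.1 + 1, i + k - 1) else s) s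
    = go k ys (j : Int) s := by
  intro ys
  induction ys with
  | nil =>
    intro j hd s
    have hlen : A.length ≤ j := by
      by_contra hc
      have := List.drop_eq_nil_iff.mp hd
      omega
    rw [PySem.List.pyRange_one_eq_nil (by exact_mod_cast hlen)]
    simp [go]
  | cons y ys ih =>
    intro j hd s
    have hj : j < A.length := by
      by_contra hc
      have : A.drop j = [] := List.drop_eq_nil_iff.mpr (by omega)
      rw [this] at hd; cases hd
    have hget : A[j]? = some y := by
      have h0 : (A.drop j)[0]? = some y := by rw [hd]; rfl
      rw [List.getElem?_drop] at h0
      simpa using h0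
    have hgd : PySem.List.pyGetD A (j : Int) 0 = y := by
      rw [PySem.List.pyGetD_natCast]
      simp [List.getD_eq_getElem?_getD, hget]
    have hdrop : A.drop (j + 1) = ys := by
      have : A.drop (j + 1) = (A.drop j).drop 1 := by
        rw [List.drop_drop]
      rw [this, hd]; rfl
    rw [PySem.List.pyRange_one_cons (by exact_mod_cast hj)]
    simp only [List.foldl_cons, go, hgd]
    have hcast : ((j : Int) + 1) = ((j + 1 : Nat) : Int) := by push_cast; ring
    rw [hcast]
    exact ih (j + 1) hdrop _

lemma checkA_eq_go (A : List Int) (k : Int) : checkA A k = (go k A 0 (0, -1)).1 := by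
  unfold checkA
  have h := go_eq_foldA A k A 0 rfl (0, -1)
  simp only [Nat.cast_zero] at h
  rw [h]

-- proof-side list of positions of 1s, with absolute start index
def pos : List Int → Int → List Int
  | [], _ => []
  | a :: r, i => if a = 1 then i :: pos r (i + 1) else pos r (i + 1)

lemma pos_eq_onesOf : ∀ (xs : List Int) (i : Int),
    pos xs i = ((PySem.List.enumerate xs i).filter (fun p => decide (p.2 = 1))).map (fun p => p.1) := by
  intro xs
  induction xs with
  | nil => intro i; simp [pos, PySem.List.enumerate_nil]
  | cons a r ih =>
    intro i
    simp only [pos, PySem.List.enumerate_cons, List.filter_cons]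
    by_cases ha : a = 1 <;> simp [ha, ih (i + 1)]

lemma pos_ge : ∀ (xs : List Int) (i q : Int), q ∈ pos xs i → i ≤ q := by
  intro xs
  induction xs with
  | nil => intro i q h; simp [pos] at h
  | cons a r ih =>
    intro i q h
    simp only [pos] at h
    by_cases ha : a = 1
    · rw [if_pos ha] at h
      rcases List.mem_cons.mp h with h | h
      · omega
      · have := ih (i + 1) q h; omega
    · rw [if_neg ha] at h
      have := ih (i + 1) q h; omega

lemma pos_sorted : ∀ (xs : List Int) (i : Int), (pos xs i).Pairwise (· < ·) := by
  intro xs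
  induction xs with
  | nil => intro i; simp [pos]
  | cons a r ih =>
    intro i
    simp only [pos]
    by_cases ha : a = 1
    · rw [if_pos ha]
      exact List.pairwise_cons.mpr ⟨fun q hq => by have := pos_ge r (i + 1) q hq; omega, ih (i + 1)⟩
    · rw [if_neg ha]; exact ih (i + 1)

-- filter-based version of countCover (no sortedness needed in the main induction)
def cnt (L : Int) : List Int → Int
  | [] => 0
  | p :: ps => 1 + cnt L (ps.filter (fun q => decide (p + L ≤ q)))
termination_by xs => xs.length
decreasing_by
  simp only [List.length_unattach, List.length_cons]
  exact Nat.lt_succ_of_le (le_trans (List.length_filter_le _ _) (by simp))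

lemma dropWhile_lt_eq_filter (c : Int) :
    ∀ (xs : List Int), xs.Pairwise (· < ·) →
    xs.dropWhile (fun q => decide (q < c)) = xs.filter (fun q => decide (c ≤ q)) := by
  intro xs
  induction xs with
  | nil => intro _; rfl
  | cons x xs ih =>
    intro hp
    rcases List.pairwise_cons.mp hp with ⟨hx, htail⟩
    by_cases hxc : x < c
    · rw [List.dropWhile_cons_of_pos (by simpa using hxc),
          List.filter_cons_of_neg (by simpa using hxc)]
      exact ih htail
    · rw [List.dropWhile_cons_of_neg (by simpa using hxc),
          List.filter_cons_of_pos (by simpa using hxc)]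
      have : xs.filter (fun q => decide (c ≤ q)) = xs := by
        apply List.filter_eq_self.mpr
        intro q hq
        have := hx q hq
        simp; omega
      rw [this]

lemma countCover_eq_cnt (L : Int) :
    ∀ (xs : List Int), xs.Pairwise (· < ·) → countCover L xs = cnt L xs := by
  intro xs
  induction xs using countCover.induct L with
  | case1 => intro _; simp [countCover, cnt]
  | case2 p ps ih =>
    intro hp
    rcases List.pairwise_cons.mp hp with ⟨_, htail⟩
    rw [countCover, cnt, dropWhile_lt_eq_filter (p + L) ps htail]
    rw [dropWhile_lt_eq_filter (p + L) ps htail] at ih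
    rw [ih ((htail.sublist List.filter_sublist))]

-- the central invariant: A's greedy pair-fold equals the filtered position count
lemma go_eq_cnt (L : Int) (hL : 1 ≤ L) :
    ∀ (xs : List Int) (i b l : Int),
    (go L xs i (b, l)).1 = b + cnt L ((pos xs i).filter (fun q => decide (l < q))) := by
  intro xs
  induction xs with
  | nil => intro i b l; simp [go, pos, cnt]
  | cons a r ih =>
    intro i b l
    simp only [go, pos]
    by_cases ha : a = 1
    · by_cases hl : l < i
      · rw [if_pos ⟨ha, hl⟩, if_pos ha, List.filter_cons_of_pos (by simpa using hl)]
        rw [cnt, ih (i + 1) (b + 1) (i + L - 1)]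
        have hff : ((pos r (i + 1)).filter (fun q => decide (l < q))).filter
              (fun q => decide (i + L ≤ q))
            = (pos r (i + 1)).filter (fun q => decide (i + L - 1 < q)) := by
          rw [List.filter_filter]
          apply List.filter_congr
          intro q _
          simp; omega
        rw [hff]; ring
      · rw [if_neg (by tauto), if_pos ha, List.filter_cons_of_neg (by simpa using hl)]
        exact ih (i + 1) b l
    · rw [if_neg (by tauto), if_neg ha]
      exact ih (i + 1) b l

lemma checkA_eq_countCover (A : List Int) (L : Int) (hL : 1 ≤ L) :
    checkA A L = countCover L (onesOf A) := by
  rw [checkA_eq_go, go_eq_cnt L hL A 0 0 (-1)]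
  have hself : (pos A 0).filter (fun q => decide ((-1 : Int) < q)) = pos A 0 := by
    apply List.filter_eq_self.mpr
    intro q hq
    have := pos_ge A 0 q hq
    simp; omega
  rw [hself, ← countCover_eq_cnt L (pos A 0) (pos_sorted A 0), pos_eq_onesOf A 0]
  simp [onesOf]

-- scanB returns -1 when no length in [L, n] is feasible
lemma scanB_none (A : List Int) (k : Int) :
    ∀ (L : Int), 1 ≤ L → (∀ j, L ≤ j → j ≤ (A.length : Int) → ¬ checkA A j ≤ k) →
    scanB (A.length : Int) (onesOf A) k L = -1 := by
  intro L
  induction L using scanB.induct (A.length : Int) (onesOf A) k with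
  | case1 L h hfeas =>
    intro hL hno
    rw [← checkA_eq_countCover A L hL] at hfeas
    exact absurd hfeas (hno L le_rfl h)
  | case2 L h hfeas ih =>
    intro hL hno
    rw [scanB, dif_pos h, if_neg hfeas]
    exact ih (by omega) (fun j hj hj2 => hno j (by omega) hj2)
  | case3 L h =>
    intro _ _
    rw [scanB, dif_neg h]

-- scanB returns the first feasible length
lemma scanB_some (A : List Int) (k : Int) :
    ∀ (L m : Int), 1 ≤ L → L ≤ m → m ≤ (A.length : Int) → checkA A m ≤ k →
    (∀ j, L ≤ j → j < m → ¬ checkA A j ≤ k) →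
    scanB (A.length : Int) (onesOf A) k L = m := by
  intro L
  induction L using scanB.induct (A.length : Int) (onesOf A) k with
  | case1 L h hfeas =>
    intro m hL hLm hm hPm hno
    rw [← checkA_eq_countCover A L hL] at hfeas
    have hLm2 : L = m := by
      by_contra hc
      exact hno L le_rfl (by omega) hfeas
    rw [scanB, dif_pos h, if_pos (by rw [← checkA_eq_countCover A L hL]; exact hfeas), hLm2]
  | case2 L h hfeas ih =>
    intro m hL hLm hm hPm hno
    rw [← checkA_eq_countCover A L hL] at hfeas
    have hLm2 : L ≠ m := fun he => hfeas (he ▸ hPm)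
    rw [scanB, dif_pos h, if_neg (by rw [← checkA_eq_countCover A L hL]; exact hfeas)]
    exact ih m (by omega) (by omega) hm hPm (fun j hj hj2 => hno j (by omega) hj2)
  | case3 L h =>
    intro m hL hLm hm hPm hno
    omega

-- monotonicity of A's greedy counter in the board length
lemma go_mono (L L' : Int) (hLL' : L ≤ L') :
    ∀ (xs : List Int) (i b l b' l' : Int),
    b' ≤ b → (b' = b → l ≤ l') → l ≤ i + L - 2 → l' ≤ i + L' - 2 →
    (go L' xs i (b', l')).1 ≤ (go L xs i (b, l)).1 := by
  intro xs
  induction xs with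
  | nil => intro i b l b' l' h1 h2 h3 h4; simpa [go] using h1
  | cons a xs ih =>
    intro i b l b' l' h1 h2 h3 h4
    simp only [go]
    by_cases ha : a = 1
    · by_cases hA : l < i
      · by_cases hB : l' < i
        · simp only [ha, hA, hB, and_self, if_pos]
          exact ih (i + 1) (b + 1) (i + L - 1) (b' + 1) (i + L' - 1)
            (by omega) (by omega) (by omega) (by omega)
        · simp only [ha, hA, hB, true_and, if_true, and_false, if_false]
          exact ih (i + 1) (b + 1) (i + L - 1) b' l'
            (by omega) (by omega) (by omega) (by omega)
      · by_cases hB : l' < i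
        · have hblt : b' < b := by
            by_contra hc
            have : b' = b := by omega
            have := h2 this
            omega
          simp only [ha, hA, hB, true_and, if_true, and_false, if_false]
          exact ih (i + 1) b l (b' + 1) (i + L' - 1)
            (by omega) (by omega) (by omega) (by omega)
        · simp only [ha, hA, hB, and_false, if_false]
          exact ih (i + 1) b l b' l' h1 h2 (by omega) (by omega)
    · simp only [ha, false_and, if_false]
      exact ih (i + 1) b l b' l' h1 h2 (by omega) (by omega)

lemma checkA_mono (A : List Int) {L L' : Int} (hL : 1 ≤ L) (hLL' : L ≤ L') :
    checkA A L' ≤ checkA A L := by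
  rw [checkA_eq_go, checkA_eq_go]
  exact go_mono L L' hLL' A 0 0 (-1) 0 (-1) le_rfl (fun _ => le_rfl)
    (by omega) (by omega)

-- the binary-search loop computes the same first feasible length
lemma boardsLoop_eq_scan (A : List Int) (k : Int) :
    ∀ (beg end_ res : Int), 1 ≤ beg → end_ ≤ (A.length : Int) →
    (∀ j, 1 ≤ j → j < beg → ¬ checkA A j ≤ k) →
    (res = -1 → end_ = (A.length : Int)) →
    (res ≠ -1 → res = end_ + 1 ∧ checkA A res ≤ k ∧ res ≤ (A.length : Int)) →
    beg ≤ end_ + 1 →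
    boardsLoop A k beg end_ res = scanB (A.length : Int) (onesOf A) k 1 := by
  intro beg end_ res
  induction beg, end_, res using boardsLoop.induct A k with
  | case1 beg end_ res h mid hfeas ih =>
    intro h1 h2 h3 h4 h5 h6
    have hmid : mid = PySem.Int.floordiv (beg + end_) 2 := rfl
    have hb := PySem.Int.floordiv_two_mid_bounds h
    rw [← hmid] at hb
    rw [boardsLoop, dif_pos h]
    simp only [← hmid, if_pos hfeas]
    exact ih h1 (by omega) h3 (by omega)
      (fun _ => ⟨by ring, hfeas, by omega⟩) (by omega)
  | case2 beg end_ res h mid hfeas ih =>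
    intro h1 h2 h3 h4 h5 h6
    have hmid : mid = PySem.Int.floordiv (beg + end_) 2 := rfl
    have hb := PySem.Int.floordiv_two_mid_bounds h
    rw [← hmid] at hb
    rw [boardsLoop, dif_pos h]
    simp only [← hmid, if_neg hfeas]
    refine ih (by omega) h2 ?_ h4 h5 (by omega)
    intro j hj1 hj2
    by_cases hjb : j < beg
    · exact h3 j hj1 hjb
    · intro hPj
      exact hfeas (le_trans (checkA_mono A hj1 (by omega)) hPj)
  | case3 beg end_ res h =>
    intro h1 h2 h3 h4 h5 h6
    rw [boardsLoop, dif_neg h]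
    by_cases hres : res = -1
    · subst hres
      have hend := h4 rfl
      exact (scanB_none A k 1 le_rfl (fun j hj hj2 => h3 j hj (by omega))).symm
    · obtain ⟨he, hP, hn⟩ := h5 hres
      exact (scanB_some A k 1 res le_rfl (by omega) hn hP
        (fun j hj hj2 => h3 j hj (by omega))).symm

-- ===== VERDICT (by name: the statement is the Claim_ definition above) =====
theorem boards_spec : Claim_equal_boards := by
  intro A k _
  unfold Spec_boards boards boards_alt
  exact boardsLoop_eq_scan A k 1 (A.length : Int) (-1) le_rfl le_rfl
    (by omega) (fun _ => rfl) (fun hc => absurd rfl hc) (by omega)
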